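-- pv_equiv track=rewrite | github.com/rutvijmavani/auto-email | jobs/ats/sitemap.py | _pick_best_locale
-- ===== SOURCE A (Python) =====
-- def _pick_best_locale(candidates, locale_pref="en"):
--     """
--     From multiple URL entries for the same job ID (multi-locale sites like JnJ),
--     pick the preferred locale URL.
--     """
--     # Build locale preference order
--     preferred = [
--         f"/{locale_pref}/",
--         "/en/",
--         "/en-us/",
--         "/en-gb/",
--         "/en-ca/",
--     ]
--     for pref in preferred:
--         for entry in candidates:
--             if pref in entry["url"].lower():
--                 return entry
--     return candidates[0]
-- ===== SOURCE B (Python) =====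
-- def _pick_best_locale(candidates, locale_pref="en"):
--     preferred = [
--         f"/{locale_pref}/",
--         "/en/",
--         "/en-us/",
--         "/en-gb/",
--         "/en-ca/",
--     ]
--
--     def rank(entry):
--         url = entry["url"].lower()
--         for i, pref in enumerate(preferred):
--             if pref in url:
--                 return i
--         return len(preferred)
--
--     best = None
--     best_rank = len(preferred) + 1
--     for entry in candidates:
--         r = rank(entry)
--         if r < best_rank:
--             best, best_rank = entry, r
--     return best if best is not None else candidates[0]
-- ===== Notes on version B (the rewrite author's own statement) =====
-- stated objective: alternative
-- what changed: Replaced A's preference-major nested loops (scan all candidates once per preference string) by a single candidate-major pass that scores each entry with rank() = index of the first matching preference and keeps the strictly best-ranked earliest entry.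
-- outside the precondition, e.g. on _pick_best_locale([{'url': '/en/a'}, {}], 'en'): A returns {'url': '/en/a'}, B raises KeyError
import Mathlib
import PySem

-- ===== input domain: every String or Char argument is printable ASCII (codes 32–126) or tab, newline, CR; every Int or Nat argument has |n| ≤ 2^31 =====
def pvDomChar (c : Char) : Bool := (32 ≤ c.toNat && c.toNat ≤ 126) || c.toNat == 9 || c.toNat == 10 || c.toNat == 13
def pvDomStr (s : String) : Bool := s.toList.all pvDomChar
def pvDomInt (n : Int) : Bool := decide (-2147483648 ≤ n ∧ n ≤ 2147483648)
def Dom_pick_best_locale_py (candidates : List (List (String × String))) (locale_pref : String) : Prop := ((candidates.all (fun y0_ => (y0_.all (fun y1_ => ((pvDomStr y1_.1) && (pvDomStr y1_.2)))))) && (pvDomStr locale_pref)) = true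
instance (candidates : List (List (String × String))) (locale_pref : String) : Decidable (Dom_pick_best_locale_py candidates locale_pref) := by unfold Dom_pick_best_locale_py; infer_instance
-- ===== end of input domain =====

-- B replaces A's preference-major nested loops by one candidate-major pass that ranks each
-- entry (index of its first matching preference) and keeps the earliest strictly-best entry.

-- entry["url"].lower(), shared by both ports (exact: first match in the association list)
def pvUrl (entry : List (String × String)) : String :=
  PySem.Str.lower ((PySem.Dict.mk entry).getD "url" "")

-- the `preferred` list both Pythons build
def pvPrefs (locale_pref : String) : List String :=
  ["/" ++ locale_pref ++ "/", "/en/", "/en-us/", "/en-gb/", "/en-ca/"]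

-- ===== PORT A =====
-- inner loop: `for entry in candidates: if pref in entry["url"].lower(): return entry`
def pvFindA (pref : String) (candidates : List (List (String × String))) :
    Option (List (String × String)) :=
  candidates.find? (fun entry => PySem.Str.isIn pref (pvUrl entry))

-- outer loop: `for pref in preferred: …`
def pvOuterA (candidates : List (List (String × String))) :
    List String → Option (List (String × String))
  | [] => none
  | p :: ps =>
    match pvFindA p candidates with
    | some e => some e
    | none => pvOuterA candidates ps

def pick_best_locale_py (candidates : List (List (String × String))) (locale_pref : String) :
    List (String × String) :=
  match pvOuterA candidates (pvPrefs locale_pref) with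
  | some e => e
  | none => (PySem.List.pyGet? candidates 0).getD []   -- candidates[0]; Pre_ rules out the IndexError

-- ===== PORT B =====
-- rank(entry): index of the first preference contained in the url, else len(preferred)
def pvRankGo (url : String) : List String → Nat
  | [] => 0
  | p :: ps => if PySem.Str.isIn p url then 0 else pvRankGo url ps + 1

def pvRank (preferred : List String) (entry : List (String × String)) : Nat :=
  pvRankGo (pvUrl entry) preferred

def pick_best_locale_py_alt (candidates : List (List (String × String))) (locale_pref : String) :
    List (String × String) :=
  let preferred := pvPrefs locale_pref
  let st := candidates.foldl
    (fun (st : Option (List (String × String)) × Nat) entry =>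
      let r := pvRank preferred entry
      if r < st.2 then (some entry, r) else st)
    (none, preferred.length + 1)
  match st.1 with
  | some e => e
  | none => (PySem.List.pyGet? candidates 0).getD []

-- ===== PRECONDITION & SPEC =====
-- Pre_ excludes the inputs on which the Python A raises: the empty list (IndexError) and lists
-- with an entry lacking the "url" key (KeyError). It thereby also excludes some inputs A still
-- returns on (an entry matching the first preference before the first key-less entry), on which
-- B raises KeyError instead.
def Pre_pick_best_locale_py (candidates : List (List (String × String))) (locale_pref : String) : Prop :=
  candidates ≠ [] ∧ ∀ e ∈ candidates, (PySem.Dict.mk e).contains "url" = true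
instance (candidates : List (List (String × String))) (locale_pref : String) : Decidable (Pre_pick_best_locale_py candidates locale_pref) := by unfold Pre_pick_best_locale_py; infer_instance

def pvWitness_pick_best_locale_py : (List (List (String × String))) × String :=
  ([[("url", "/en-us/j/1")], [("url", "/fr/j/1")]], "fr")

def Spec_pick_best_locale_py (candidates : List (List (String × String))) (locale_pref : String) (out : List (String × String)) : Prop := out = pick_best_locale_py_alt candidates locale_pref
instance (candidates : List (List (String × String))) (locale_pref : String) (out : List (String × String)) : Decidable (Spec_pick_best_locale_py candidates locale_pref out) := by unfold Spec_pick_best_locale_py; infer_instance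

-- ===== CLAIM (what is proved, stated in full; the proofs are below) =====
def Claim_equal_pick_best_locale_py : Prop := ∀ (candidates : List (List (String × String))) (locale_pref : String), Dom_pick_best_locale_py candidates locale_pref → Pre_pick_best_locale_py candidates locale_pref → Spec_pick_best_locale_py candidates locale_pref (pick_best_locale_py candidates locale_pref)

-- ===== LEMMAS AND PROOFS =====

-- proof-side selector: earliest entry of b :: es with strictly minimal rank
def pvBsel (rk : List (String × String) → Nat) (b : List (String × String)) :
    List (List (String × String)) → List (String × String)
  | [] => b
  | e :: es => if rk e < rk b then pvBsel rk e es else pvBsel rk b es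

theorem pvRankGo_le (url : String) (ps : List String) : pvRankGo url ps ≤ ps.length := by
  induction ps with
  | nil => simp [pvRankGo]
  | cons p ps ih =>
    simp only [pvRankGo, List.length_cons]
    split <;> omega

theorem pvBsel_mem (rk : List (String × String) → Nat) (b : List (String × String))
    (es : List (List (String × String))) : pvBsel rk b es ∈ b :: es := by
  induction es generalizing b with
  | nil => simp [pvBsel]
  | cons e es ih =>
    simp only [pvBsel]
    split
    · have := ih e; simp at this ⊢; tauto
    · have := ih b; simp at this ⊢; tauto

theorem pvBsel_le (rk : List (String × String) → Nat) (b : List (String × String))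
    (es : List (List (String × String))) :
    ∀ e ∈ b :: es, rk (pvBsel rk b es) ≤ rk e := by
  induction es generalizing b with
  | nil => simp [pvBsel]
  | cons d ds ih =>
    intro e he
    simp only [pvBsel]
    by_cases h : rk d < rk b
    · rw [if_pos h]
      rcases List.mem_cons.mp he with rfl | he'
      · have := ih d d (by simp); omega
      · rcases List.mem_cons.mp he' with rfl | he''
        · exact ih e e (by simp)
        · exact ih d e (by simp [he''])
    · rw [if_neg h]
      rcases List.mem_cons.mp he with rfl | he'
      · exact ih e e (by simp)
      · rcases List.mem_cons.mp he' with rfl | he''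
        · have := ih b b (by simp); omega
        · exact ih b e (by simp [he''])

theorem pvBsel_stay (rk : List (String × String) → Nat) (b : List (String × String))
    (es : List (List (String × String))) (h : ∀ e ∈ es, ¬ rk e < rk b) :
    pvBsel rk b es = b := by
  induction es with
  | nil => rfl
  | cons d ds ih =>
    simp only [pvBsel]
    rw [if_neg (h d (by simp))]
    exact ih (fun e he => h e (by simp [he]))

theorem pvBsel_congr (rk1 rk2 : List (String × String) → Nat) (b : List (String × String))
    (es : List (List (String × String))) (h : ∀ e ∈ b :: es, rk1 e = rk2 e + 1) :
    pvBsel rk1 b es = pvBsel rk2 b es := by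
  induction es generalizing b with
  | nil => rfl
  | cons d ds ih =>
    simp only [pvBsel]
    have hb := h b (by simp)
    have hd := h d (by simp)
    have : rk1 d < rk1 b ↔ rk2 d < rk2 b := by omega
    by_cases hc : rk2 d < rk2 b
    · rw [if_pos (this.mpr hc), if_pos hc]
      exact ih d (fun e he => by rcases (List.mem_cons.mp he) with rfl | he <;> simp_all [h e, List.mem_cons])
    · rw [if_neg (fun hx => hc (this.mp hx)), if_neg hc]
      exact ih b (fun e he => by rcases (List.mem_cons.mp he) with rfl | he <;> simp_all [h e, List.mem_cons])

-- if b already has rank 0 the selector keeps it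
theorem pvBsel_zero (rk : List (String × String) → Nat) (b : List (String × String))
    (es : List (List (String × String))) (hb : rk b = 0) : pvBsel rk b es = b :=
  pvBsel_stay rk b es (fun e _ => by omega)

-- a find-first for rank-0 entries is what the selector returns
theorem pvBsel_find (pred : List (String × String) → Bool) (rk : List (String × String) → Nat)
    (hpr : ∀ x, pred x = true ↔ rk x = 0) :
    ∀ (cs : List (List (String × String))) (b e : List (String × String)),
      List.find? pred (b :: cs) = some e → pvBsel rk b cs = e := by
  intro cs
  induction cs with
  | nil =>
    intro b e h
    simp only [List.find?] at h
    cases hp : pred b <;> simp [hp] at h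
    simp only [pvBsel]
    exact h
  | cons d ds ih =>
    intro b e h
    by_cases hp : pred b = true
    · rw [List.find?_cons_of_pos hp] at h
      cases h
      exact pvBsel_zero rk b (d :: ds) ((hpr b).mp hp)
    · rw [List.find?_cons_of_neg (by simpa using hp)] at h
      have hb0 : rk b ≠ 0 := fun h0 => hp ((hpr b).mpr h0)
      simp only [pvBsel]
      by_cases hd : pred d = true
      · have hd0 : rk d = 0 := (hpr d).mp hd
        rw [if_pos (by omega)]
        rw [List.find?_cons_of_pos hd] at h
        cases h
        exact pvBsel_zero rk d ds hd0
      · rw [List.find?_cons_of_neg (by simpa using hd)] at h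
        have hd0 : rk d ≠ 0 := fun h0 => hd ((hpr d).mpr h0)
        split
        · exact ih d e (by rw [List.find?_cons_of_neg (by simpa using hd)]; exact h)
        · exact ih b e (by rw [List.find?_cons_of_neg (by simpa using hp)]; exact h)

-- A's outer loop, characterised through B's rank and the selector
theorem pvOuterA_eq (b : List (String × String)) (es : List (List (String × String))) :
    ∀ ps : List String,
      pvOuterA (b :: es) ps =
        (if pvRankGo (pvUrl (pvBsel (fun e => pvRankGo (pvUrl e) ps) b es)) ps < ps.length
         then some (pvBsel (fun e => pvRankGo (pvUrl e) ps) b es) else none) := by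
  intro ps
  induction ps with
  | nil => simp [pvOuterA]
  | cons p ps ih =>
    have hpred : ∀ x : List (String × String),
        (PySem.Str.isIn p (pvUrl x)) = true ↔ (fun e => pvRankGo (pvUrl e) (p :: ps)) x = 0 := by
      intro x
      simp only [pvRankGo]
      constructor
      · intro h; rw [if_pos h]
      · intro h; by_contra hc
        rw [if_neg (by simpa using hc)] at h; omega
    simp only [pvOuterA]
    cases hf : pvFindA p (b :: es) with
    | some e =>
      have hsel := pvBsel_find (fun x => PySem.Str.isIn p (pvUrl x))
        (fun e => pvRankGo (pvUrl e) (p :: ps)) hpred es b e hf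
      have he0 : pvRankGo (pvUrl e) (p :: ps) = 0 := by
        have := List.find?_some hf
        exact (hpred e).mp this
      rw [hsel, he0]
      simp
    | none =>
      have hnone : ∀ x ∈ b :: es, ¬ (PySem.Str.isIn p (pvUrl x)) = true := by
        intro x hx
        have := List.find?_eq_none.mp hf x hx
        simpa using this
      have hshift : ∀ x ∈ b :: es,
          (fun e => pvRankGo (pvUrl e) (p :: ps)) x = (fun e => pvRankGo (pvUrl e) ps) x + 1 := by
        intro x hx
        simp only [pvRankGo]
        rw [if_neg (by simpa using hnone x hx)]
      have hcong := pvBsel_congr _ _ b es hshift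
      rw [hcong]
      have hmem := pvBsel_mem (fun e => pvRankGo (pvUrl e) ps) b es
      have hx := hshift _ hmem
      simp only at hx
      rw [ih, hx]
      simp only [List.length_cons]
      by_cases hlt : pvRankGo (pvUrl (pvBsel (fun e => pvRankGo (pvUrl e) ps) b es)) ps < ps.length
      · rw [if_pos hlt, if_pos (by omega)]
      · rw [if_neg hlt, if_neg (by omega)]

-- B's fold, characterised by the selector
theorem pvFoldl_bsel (rk : List (String × String) → Nat) :
    ∀ (es : List (List (String × String))) (b : List (String × String)),
      es.foldl (fun (st : Option (List (String × String)) × Nat) entry =>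
          let r := rk entry; if r < st.2 then (some entry, r) else st) (some b, rk b)
        = (some (pvBsel rk b es), rk (pvBsel rk b es)) := by
  intro es
  induction es with
  | nil => intro b; rfl
  | cons d ds ih =>
    intro b
    simp only [List.foldl_cons, pvBsel]
    by_cases h : rk d < rk b
    · rw [if_pos h, if_pos h]; exact ih d
    · rw [if_neg h, if_neg h]; exact ih b

-- ===== VERDICT (by name: the statement is the Claim_ definition above) =====
theorem pick_best_locale_py_spec : Claim_equal_pick_best_locale_py := by
  intro candidates locale_pref _hdom hpre
  unfold Spec_pick_best_locale_py
  cases candidates with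
  | nil => exact absurd rfl hpre.1
  | cons c cs =>
    set ps := pvPrefs locale_pref with hps
    set rk : List (String × String) → Nat := fun e => pvRankGo (pvUrl e) ps with hrk
    have hA := pvOuterA_eq c cs ps
    have hrank_c : rk c < ps.length + 1 := by
      have := pvRankGo_le (pvUrl c) ps; simp only [hrk]; omega
    have hB : pick_best_locale_py_alt (c :: cs) locale_pref = pvBsel rk c cs := by
      unfold pick_best_locale_py_alt
      simp only [← hps, List.foldl_cons, pvRank]
      rw [if_pos hrank_c]
      rw [pvFoldl_bsel rk cs c]
    unfold pick_best_locale_py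
    rw [← hps, hA, hB]
    by_cases hlt : rk (pvBsel rk c cs) < ps.length
    · rw [if_pos hlt]
    · rw [if_neg hlt]
      have hle : rk (pvBsel rk c cs) ≤ ps.length := pvRankGo_le _ _
      have heq : rk (pvBsel rk c cs) = ps.length := by omega
      have hall := pvBsel_le rk c cs
      have hc : pvBsel rk c cs = c := by
        apply pvBsel_stay
        intro e he
        have h1 := hall e (by simp [he])
        have h2 : rk e ≤ ps.length := pvRankGo_le _ _
        have h3 := hall c (by simp)
        omega
      rw [hc]
      simp [PySem.List.pyGet?, PySem.List.pyIdx?]
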